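-- pv_equiv track=rewrite | github.com/miliar/Code_Jam_Webscraper | solutions_python/solutions_year10_round0_nr3/174.py | money
-- ===== SOURCE A (Python) =====
-- def money(r, k, n, l):
--     w = 0
--     m = 0
--     for i in range(0, r):
--         t = 0
--         g = 0
--         while t + l[w] <= k:
--             t += l[w]
--             g += 1
--             w = (w + 1) % n
--             if g == n:
--                 break
--         m += t
--     return m
-- ===== SOURCE B (Python) =====
-- def money(r, k, n, l):
--     # Cycle detection over the functional graph of boarding positions:
--     # each run's (earnings, next start) depends only on the current start,
--     # so the per-run sequence is eventually periodic; detect the first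
--     # repeated start and jump over whole cycles instead of simulating them.
--     if r <= 0 or n <= 0:
--         return 0
--
--     def run(s):
--         t = 0
--         for _ in range(n):
--             x = l[s]
--             if t + x > k:
--                 break
--             t += x
--             s = (s + 1) % n
--         return t, s
--
--     total = 0
--     w = 0
--     i = 0
--     seen = {}
--     skipped = False
--     while i < r:
--         if not skipped and w in seen:
--             j, mj = seen[w]
--             cyc = (r - i) // (i - j)
--             total += cyc * (total - mj)
--             i += cyc * (i - j)
--             skipped = True
--         else:
--             seen[w] = (i, total)
--             t, w = run(w)
--             total += t
--             i += 1
--     return total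
-- ===== Notes on version B (the rewrite author's own statement) =====
-- stated objective: faster
-- what changed: B computes each run's (earnings, next start) as a pure function of the start position and uses cycle detection on that functional graph to jump over repeated cycles, instead of A's simulation of all r runs.
-- outside the precondition, e.g. on money(1, 10, -1, [3]): A returns 9, B returns 0; on money(1, 6, -2, [3, 4]): A returns 3, B returns 0; on money(1, 5, 3, [1, 9]): A returns 1, B returns 1
import Mathlib
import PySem

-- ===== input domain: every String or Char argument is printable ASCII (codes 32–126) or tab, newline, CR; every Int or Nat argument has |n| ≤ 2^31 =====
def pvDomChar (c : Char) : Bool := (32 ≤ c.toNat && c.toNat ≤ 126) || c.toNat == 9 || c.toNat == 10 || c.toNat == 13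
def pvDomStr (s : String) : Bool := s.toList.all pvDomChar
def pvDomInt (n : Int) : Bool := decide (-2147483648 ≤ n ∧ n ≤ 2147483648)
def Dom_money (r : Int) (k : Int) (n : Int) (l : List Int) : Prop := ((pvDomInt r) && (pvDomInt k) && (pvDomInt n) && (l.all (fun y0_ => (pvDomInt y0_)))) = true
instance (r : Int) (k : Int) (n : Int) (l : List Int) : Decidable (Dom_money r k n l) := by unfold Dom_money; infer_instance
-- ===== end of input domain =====

-- B replaces A's simulation of all r runs by cycle detection on the functional
-- graph start-position ↦ (run earnings, next start), jumping over whole cycles;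
-- a timing run measured B faster on the large inputs.

-- ===== PORT A =====
-- A's inner 'while t + l[w] <= k' loop; the counter g that breaks at g == n is
-- encoded as the remaining fuel (initially n-1, so at most n boardings happen).
-- pyGet? = none is Python's IndexError: those inputs are excluded by Pre_money.
def moneyInner (k : Int) (n : Int) (l : List Int) : Nat → Int → Int → Int × Int
  | fuel, t, w =>
    match PySem.List.pyGet? l w with
    | none => (t, w)
    | some x =>
      if t + x ≤ k then
        match fuel with
        | 0 => (t + x, PySem.Int.mod (w + 1) n)        -- g == n: break
        | fuel' + 1 => moneyInner k n l fuel' (t + x) (PySem.Int.mod (w + 1) n)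
      else (t, w)

def money (r : Int) (k : Int) (n : Int) (l : List Int) : Int :=
  (List.foldl
    (fun (st : Int × Int) (_ : Int) =>
      let p := moneyInner k n l (n - 1).toNat 0 st.2
      (st.1 + p.1, p.2))
    (0, 0) (PySem.List.pyRange 0 r 1)).1

-- ===== PORT B =====
-- Source B's run(s): one coaster run from start s, at most n boardings
-- ('for _ in range(n)'); pyGet? = none is the IndexError excluded by Pre_money.
def moneyRun (k : Int) (n : Int) (l : List Int) : Nat → Int → Int → Int × Int
  | 0, t, s => (t, s)
  | fuel + 1, t, s =>
    match PySem.List.pyGet? l s with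
    | none => (t, s)
    | some x =>
      if t + x > k then (t, s)
      else moneyRun k n l fuel (t + x) (PySem.Int.mod (s + 1) n)

-- Source B's while loop: seen maps a start position to (run index, total so far);
-- at the first repeated start, whole cycles are jumped over and skipped is set.
def moneyLoop (k : Int) (n : Int) (l : List Int) (r : Int)
    (seen : PySem.Dict Int (Int × Int)) (skipped : Bool) (w total i : Int) : Int :=
  if h : i < r then
    match skipped, PySem.Dict.get? seen w with
    | false, some (j, mj) =>
        let cyc := PySem.Int.floordiv (r - i) (i - j)
        moneyLoop k n l r seen true w (total + cyc * (total - mj)) (i + cyc * (i - j))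
    | sk, _ =>
        let p := moneyRun k n l n.toNat 0 w
        moneyLoop k n l r (PySem.Dict.insert seen w (i, total)) sk p.2 (total + p.1) (i + 1)
  else total
  termination_by ((if skipped then 0 else 1 : Nat), (r - i).toNat)
  decreasing_by
  · exact Prod.Lex.left _ _ (by simp)
  · exact Prod.Lex.right _ (by omega)

def money_alt (r : Int) (k : Int) (n : Int) (l : List Int) : Int :=
  if r ≤ 0 ∨ n ≤ 0 then 0
  else moneyLoop k n l r PySem.Dict.empty false 0 0 0

-- ===== PRECONDITION & SPEC =====
-- Pre_ admits every input whose shape keeps A's indices inside the list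
-- (1 ≤ n ≤ len(l)), plus the inputs where the loop body never boards anyone
-- (r ≤ 0, or the first group alone exceeds k). Excluded are the remaining
-- n < 1 / n > len(l) inputs: there A's index w = (w+1) % n leaves the list
-- (IndexError) or hits % 0 (ZeroDivisionError) on most inputs, and where A
-- still returns the value is an accident of Python's negative-index
-- wraparound or of which prefix the run happens to touch — see claim cites.
def Pre_money (r : Int) (k : Int) (n : Int) (l : List Int) : Prop :=
  (1 ≤ n ∧ n ≤ (l.length : Int)) ∨ r ≤ 0 ∨ (l ≠ [] ∧ k < l.headI)
instance (r : Int) (k : Int) (n : Int) (l : List Int) : Decidable (Pre_money r k n l) := by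
  unfold Pre_money; infer_instance

def pvWitness_money : Int × Int × Int × List Int := (5, 6, 3, [2, 3, 4])

def Spec_money (r : Int) (k : Int) (n : Int) (l : List Int) (out : Int) : Prop := out = money_alt r k n l
instance (r : Int) (k : Int) (n : Int) (l : List Int) (out : Int) : Decidable (Spec_money r k n l out) := by unfold Spec_money; infer_instance

-- ===== CLAIM (what is proved, stated in full; the proofs are below) =====
def Claim_equal_money : Prop := ∀ (r : Int) (k : Int) (n : Int) (l : List Int), Dom_money r k n l → Pre_money r k n l → Spec_money r k n l (money r k n l)

-- ===== LEMMAS AND PROOFS =====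

-- the one-run step function both programs iterate, and its iterate from (0, 0):
-- (pvP m).1 is the total after m runs, (pvP m).2 the start of run m
def pvStep (k n : Int) (l : List Int) (w : Int) : Int × Int := moneyRun k n l n.toNat 0 w
def pvF (k n : Int) (l : List Int) (p : Int × Int) : Int × Int :=
  (p.1 + (pvStep k n l p.2).1, (pvStep k n l p.2).2)
def pvP (k n : Int) (l : List Int) (m : Nat) : Int × Int := (pvF k n l)^[m] (0, 0)

lemma pvP_succ (k n : Int) (l : List Int) (m : Nat) :
    pvP k n l (m + 1) = pvF k n l (pvP k n l m) := by
  simp [pvP, Function.iterate_succ_apply']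

lemma moneyRun_zero (k n : Int) (l : List Int) (t s : Int) : moneyRun k n l 0 t s = (t, s) := rfl

lemma moneyRun_succ (k n : Int) (l : List Int) (fuel : Nat) (t s : Int) :
    moneyRun k n l (fuel + 1) t s =
      match PySem.List.pyGet? l s with
      | none => (t, s)
      | some x =>
        if t + x > k then (t, s)
        else moneyRun k n l fuel (t + x) (PySem.Int.mod (s + 1) n) := rfl

lemma moneyInner_zero (k n : Int) (l : List Int) (t w : Int) :
    moneyInner k n l 0 t w =
      match PySem.List.pyGet? l w with
      | none => (t, w)
      | some x =>
        if t + x ≤ k then (t + x, PySem.Int.mod (w + 1) n) else (t, w) := by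
  rw [moneyInner.eq_def]

lemma moneyInner_succ (k n : Int) (l : List Int) (fuel : Nat) (t w : Int) :
    moneyInner k n l (fuel + 1) t w =
      match PySem.List.pyGet? l w with
      | none => (t, w)
      | some x =>
        if t + x ≤ k then moneyInner k n l fuel (t + x) (PySem.Int.mod (w + 1) n)
        else (t, w) := by
  rw [moneyInner.eq_def]

-- A's inner loop computes exactly Source B's run (fuel off by one: g breaks at n)
lemma inner_eq_run (k n : Int) (l : List Int) :
    ∀ (fuel : Nat) (t w : Int), moneyInner k n l fuel t w = moneyRun k n l (fuel + 1) t w := by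
  intro fuel
  induction fuel with
  | zero =>
    intro t w
    rw [moneyInner_zero, moneyRun_succ]
    cases hx : PySem.List.pyGet? l w with
    | none => rfl
    | some x =>
      simp only
      by_cases h : t + x ≤ k
      · rw [if_pos h, if_neg (show ¬ (t + x > k) from by omega), moneyRun_zero]
      · rw [if_neg h, if_pos (show t + x > k from by omega)]
  | succ f ih =>
    intro t w
    rw [moneyInner_succ, moneyRun_succ]
    cases hx : PySem.List.pyGet? l w with
    | none => rfl
    | some x =>
      simp only
      by_cases h : t + x ≤ k
      · rw [if_pos h, if_neg (show ¬ (t + x > k) from by omega)]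
        exact ih _ _
      · rw [if_neg h, if_pos (show t + x > k from by omega)]

lemma foldl_const_iterate {α β : Type} (g : α → α) :
    ∀ (xs : List β) (s : α), List.foldl (fun a _ => g a) s xs = g^[xs.length] s := by
  intro xs
  induction xs with
  | nil => intro s; rfl
  | cons x xs ih => intro s; simp [List.foldl, ih, Function.iterate_succ_apply]

-- A is the r-fold iteration of the one-run step
lemma money_eq_iter (r k n : Int) (l : List Int) (hn : 1 ≤ n) :
    money r k n l = (pvP k n l r.toNat).1 := by
  have hfuel : (n - 1).toNat + 1 = n.toNat := by omega
  have hfun : (fun (st : Int × Int) (_ : Int) =>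
      let p := moneyInner k n l (n - 1).toNat 0 st.2; (st.1 + p.1, p.2)) =
      (fun (st : Int × Int) (_ : Int) => pvF k n l st) := by
    funext st y
    show (let p := moneyInner k n l (n - 1).toNat 0 st.2; (st.1 + p.1, p.2)) = pvF k n l st
    rw [inner_eq_run, hfuel]
    simp [pvF, pvStep]
  unfold money
  rw [hfun, foldl_const_iterate]
  simp [PySem.List.length_pyRange_one, pvP]

-- periodicity: once the start position repeats, starts repeat and the total
-- advances by equal increments
lemma pvPeriod (k n : Int) (l : List Int) (a b : Nat)
    (hab : (pvP k n l a).2 = (pvP k n l b).2) :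
    ∀ t : Nat, (pvP k n l (a + t)).2 = (pvP k n l (b + t)).2 ∧
      (pvP k n l (b + t)).1 = (pvP k n l b).1 + ((pvP k n l (a + t)).1 - (pvP k n l a).1) := by
  intro t
  induction t with
  | zero => exact ⟨hab, by ring⟩
  | succ s ih =>
    have h2 := ih.1
    have h1 := ih.2
    constructor
    · show (pvP k n l (a + s + 1)).2 = (pvP k n l (b + s + 1)).2
      rw [pvP_succ, pvP_succ, pvF, pvF, h2]
    · show (pvP k n l (b + s + 1)).1 =
        (pvP k n l b).1 + ((pvP k n l (a + s + 1)).1 - (pvP k n l a).1)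
      have ha : (pvP k n l (a + s + 1)).1 = (pvP k n l (a + s)).1 + (pvStep k n l (pvP k n l (b + s)).2).1 := by
        rw [pvP_succ, pvF, h2]
      have hb : (pvP k n l (b + s + 1)).1 = (pvP k n l (b + s)).1 + (pvStep k n l (pvP k n l (b + s)).2).1 := by
        rw [pvP_succ, pvF]
      rw [ha, hb]
      omega

-- q whole cycles of length b - a advance the total by q equal increments
lemma pvCycles (k n : Int) (l : List Int) (a b : Nat) (hle : a ≤ b)
    (h : (pvP k n l a).2 = (pvP k n l b).2) (q : Nat) :
    (pvP k n l (b + q * (b - a))).2 = (pvP k n l b).2 ∧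
    (pvP k n l (b + q * (b - a))).1 = (pvP k n l b).1 + (q : Int) * ((pvP k n l b).1 - (pvP k n l a).1) := by
  induction q with
  | zero => simp
  | succ s ih =>
    have h' : (pvP k n l a).2 = (pvP k n l (b + s * (b - a))).2 := by rw [h, ih.1]
    have hp := pvPeriod k n l a (b + s * (b - a)) h' (b - a)
    have hidx : b + s * (b - a) + (b - a) = b + (s + 1) * (b - a) := by ring
    have haidx : a + (b - a) = b := by omega
    rw [hidx, haidx] at hp
    refine ⟨hp.1.symm, ?_⟩
    rw [hp.2, ih.2]
    push_cast
    ring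

-- the invariant of Source B's seen dictionary
def pvGood (k n : Int) (l : List Int) (seen : PySem.Dict Int (Int × Int)) (i : Int) : Prop :=
  ∀ key j mj, PySem.Dict.get? seen key = some (j, mj) →
    0 ≤ j ∧ j < i ∧ (pvP k n l j.toNat).2 = key ∧ (pvP k n l j.toNat).1 = mj

-- after the jump (skipped = true) the loop is a plain simulation
lemma loop_skipped (k n : Int) (l : List Int) (r : Int) :
    ∀ (fm : Nat) (i : Int) (seen : PySem.Dict Int (Int × Int)) (w total : Int),
      0 ≤ i → i ≤ r → (r - i).toNat = fm →
      w = (pvP k n l i.toNat).2 → total = (pvP k n l i.toNat).1 →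
      moneyLoop k n l r seen true w total i = (pvP k n l r.toNat).1 := by
  intro fm
  induction fm with
  | zero =>
    intro i seen w total h0 hir hfm hw ht
    rw [moneyLoop.eq_def, dif_neg (show ¬ i < r from by omega)]
    have : i = r := by omega
    rw [ht, this]
  | succ fm ih =>
    intro i seen w total h0 hir hfm hw ht
    rw [moneyLoop.eq_def, dif_pos (show i < r from by omega)]
    cases hg : PySem.Dict.get? seen w with
    | none =>
      simp only
      apply ih (i + 1) _ _ _ (by omega) (by omega) (by omega) ?_ ?_
      · have hsucc : (i + 1).toNat = i.toNat + 1 := by omega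
        rw [hsucc, pvP_succ, pvF, hw]
        rfl
      · have hsucc : (i + 1).toNat = i.toNat + 1 := by omega
        rw [hsucc, pvP_succ, pvF, hw, ht]
        rfl
    | some v =>
      simp only
      apply ih (i + 1) _ _ _ (by omega) (by omega) (by omega) ?_ ?_
      · have hsucc : (i + 1).toNat = i.toNat + 1 := by omega
        rw [hsucc, pvP_succ, pvF, hw]
        rfl
      · have hsucc : (i + 1).toNat = i.toNat + 1 := by omega
        rw [hsucc, pvP_succ, pvF, hw, ht]
        rfl

-- the main phase (skipped = false): the invariant holds, the jump is correct
lemma loop_main (k n : Int) (l : List Int) (r : Int) :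
    ∀ (fm : Nat) (i : Int) (seen : PySem.Dict Int (Int × Int)) (w total : Int),
      0 ≤ i → i ≤ r → (r - i).toNat = fm → pvGood k n l seen i →
      w = (pvP k n l i.toNat).2 → total = (pvP k n l i.toNat).1 →
      moneyLoop k n l r seen false w total i = (pvP k n l r.toNat).1 := by
  intro fm
  induction fm with
  | zero =>
    intro i seen w total h0 hir hfm hgood hw ht
    rw [moneyLoop.eq_def, dif_neg (show ¬ i < r from by omega)]
    have : i = r := by omega
    rw [ht, this]
  | succ fm ih =>
    intro i seen w total h0 hir hfm hgood hw ht
    rw [moneyLoop.eq_def, dif_pos (show i < r from by omega)]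
    cases hg : PySem.Dict.get? seen w with
    | none =>
      simp only [hg]
      apply ih (i + 1) _ _ _ (by omega) (by omega) (by omega) ?_ ?_ ?_
      · -- the invariant is preserved by seen[w] = (i, total)
        intro key j mj hget
        by_cases hkey : key = w
        · subst hkey
          rw [PySem.Dict.get?_insert_self] at hget
          obtain ⟨h1, h2⟩ := Prod.mk.injEq .. ▸ (Option.some.injEq .. ▸ hget)
          refine ⟨by omega, by omega, ?_, ?_⟩ <;> simp [← h1, ← h2, hw, ht]
        · rw [PySem.Dict.get?_insert_of_ne _ _ hkey] at hget
          obtain ⟨ha, hb, hc, hd⟩ := hgood key j mj hget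
          exact ⟨ha, by omega, hc, hd⟩
      · have hsucc : (i + 1).toNat = i.toNat + 1 := by omega
        rw [hsucc, pvP_succ, pvF, hw]
        rfl
      · have hsucc : (i + 1).toNat = i.toNat + 1 := by omega
        rw [hsucc, pvP_succ, pvF, hw, ht]
        rfl
    | some v =>
      obtain ⟨j, mj⟩ := v
      simp only [hg]
      obtain ⟨hj0, hji, hjw, hjm⟩ := hgood w j mj hg
      -- the cycle jump
      have hc : 0 < i - j := by omega
      have hfd : PySem.Int.floordiv (r - i) (i - j) = (r - i) / (i - j) :=
        PySem.Int.floordiv_eq_ediv_of_pos hc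
      simp only [hfd]
      set cyc := (r - i) / (i - j) with hcyc
      have hq0 : 0 ≤ cyc := Int.ediv_nonneg (by omega) (by omega)
      have hC : cyc * (i - j) + (r - i) % (i - j) = r - i := by
        rw [mul_comm]; exact Int.mul_ediv_add_emod _ _
      have hmn : 0 ≤ (r - i) % (i - j) := Int.emod_nonneg _ (by omega)
      have hle : i + cyc * (i - j) ≤ r := by linarith
      have hnn : 0 ≤ cyc * (i - j) := mul_nonneg hq0 (by omega)
      -- Nat indices
      have hba : j.toNat ≤ i.toNat := by omega
      have hcast : ((i.toNat + cyc.toNat * (i.toNat - j.toNat) : Nat) : Int) = i + cyc * (i - j) := by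
        push_cast [Nat.cast_sub hba]
        rw [Int.toNat_of_nonneg hq0, Int.toNat_of_nonneg h0, Int.toNat_of_nonneg hj0]
      have hidx : (i + cyc * (i - j)).toNat = i.toNat + cyc.toNat * (i.toNat - j.toNat) := by
        rw [← hcast, Int.toNat_natCast]
      have hcyl := pvCycles k n l j.toNat i.toNat hba (by rw [hjw, hw]) cyc.toNat
      rw [← hidx] at hcyl
      apply loop_skipped k n l r (r - (i + cyc * (i - j))).toNat _ _ _ _ (by omega) hle rfl ?_ ?_
      · exact hw.trans hcyl.1.symm
      · rw [hcyl.2, Int.toNat_of_nonneg hq0, ← ht, hjm]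

-- when even the first group exceeds k, A never boards anyone: total 0
lemma money_zero_head (r k n : Int) (l : List Int) (h0 : l ≠ []) (hk : k < l.headI) :
    money r k n l = 0 := by
  have hget : PySem.List.pyGet? l 0 = some l.headI := by
    cases l with
    | nil => exact absurd rfl h0
    | cons x xs => simp [PySem.List.pyGet?_zero_cons]
  have hstep : ∀ (st : Int × Int) (y : Int), st.2 = 0 →
      (let p := moneyInner k n l (n - 1).toNat 0 st.2; ((st.1 + p.1, p.2) : Int × Int)) = st := by
    intro st y h2
    have hinner : moneyInner k n l (n - 1).toNat 0 st.2 = (0, 0) := by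
      rw [h2]
      cases hf : (n - 1).toNat with
      | zero =>
        rw [moneyInner_zero, hget]
        simp only
        rw [if_neg (show ¬ ((0 : Int) + l.headI ≤ k) from by omega)]
      | succ f =>
        rw [moneyInner_succ, hget]
        simp only
        rw [if_neg (show ¬ ((0 : Int) + l.headI ≤ k) from by omega)]
    simp only [hinner]
    cases st with
    | mk a b => simp at h2; simp [h2]
  have hfold : ∀ (xs : List Int) (st : Int × Int), st.2 = 0 →
      List.foldl (fun (st : Int × Int) (_ : Int) =>
        let p := moneyInner k n l (n - 1).toNat 0 st.2; (st.1 + p.1, p.2)) st xs = st := by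
    intro xs
    induction xs with
    | nil => intro st h2; rfl
    | cons y ys ih =>
      intro st h2
      show List.foldl _ (let p := moneyInner k n l (n - 1).toNat 0 st.2; (st.1 + p.1, p.2)) ys = st
      rw [hstep st y h2]
      exact ih st h2
  unfold money
  rw [hfold _ (0, 0) rfl]

-- ===== VERDICT (by name: the statement is the Claim_ definition above) =====
theorem money_spec : Claim_equal_money := by
  intro r k n l _ hpre
  unfold Spec_money money_alt
  by_cases hn : 1 ≤ n
  · rw [money_eq_iter r k n l hn]
    by_cases hr : r ≤ 0 ∨ n ≤ 0
    · have hr0 : r ≤ 0 := by omega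
      simp [hr, show r.toNat = 0 from by omega, pvP]
    · simp only [hr, if_false]
      rw [loop_main k n l r (r - 0).toNat 0 PySem.Dict.empty 0 0 (le_refl 0) (by omega) rfl
        (by intro key j mj hget; simp [PySem.Dict.get?, PySem.Dict.empty] at hget)
        (by simp [pvP]) (by simp [pvP])]
  · rw [if_pos (Or.inr (by omega))]
    rcases hpre with ⟨h1, _⟩ | hr | ⟨hl, hk⟩
    · omega
    · simp [money, PySem.List.pyRange_one_eq_nil hr]
    · exact money_zero_head r k n l hl hk
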